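-- pv_equiv track=rewrite | github.com/grasshopperTrainer/coding_practice | baekjoon/accepted/2143 두 배열의 합.py | solution
-- ===== SOURCE A (Python) =====
-- def solution(T, N, M, series):
--     # prepare sub sum series
--     acounter, bcounter = {}, {}
--     for counter, ser, l in zip((acounter, bcounter), series, (N, M)):
--         for s in range(l):
--             subsum = 0
--             for e in range(s, l):
--                 subsum += ser[e]
--                 counter[subsum] = counter.get(subsum, 0) + 1
--
--     count = 0
--     for a, c in acounter.items():
--         t = T-a
--         if t in bcounter:
--             count += bcounter[t]*c
--     return count
-- ===== SOURCE B (Python) =====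
-- def solution(T, N, M, series):
--     # collect all contiguous-subarray sums of each array into flat lists
--     sums = ([], [])
--     for out, ser, l in zip(sums, series, (N, M)):
--         for s in range(l):
--             acc = 0
--             for e in range(s, l):
--                 acc += ser[e]
--                 out.append(acc)
--     xs = sorted(sums[0])                 # ascending
--     ys = sorted(sums[1], reverse=True)   # descending
--     count = 0
--     i = j = 0
--     nx, ny = len(xs), len(ys)
--     while i < nx and j < ny:
--         s = xs[i] + ys[j]
--         if s < T:
--             i += 1
--         elif s > T:
--             j += 1
--         else:
--             i2 = i
--             while i2 < nx and xs[i2] == xs[i]: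
--                 i2 += 1
--             j2 = j
--             while j2 < ny and ys[j2] == ys[j]:
--                 j2 += 1
--             count += (i2 - i) * (j2 - j)
--             i, j = i2, j2
--     return count
-- ===== Notes on version B (the rewrite author's own statement) =====
-- stated objective: alternative
-- what changed: A matches subarray sums by building two hash-count dicts and looking up T-a for each distinct a-sum; B collects the sums into flat lists, sorts them, and counts matches with a two-pointer block sweep (ascending a-sums vs descending b-sums), multiplying equal-value run lengths.
import Mathlib
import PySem

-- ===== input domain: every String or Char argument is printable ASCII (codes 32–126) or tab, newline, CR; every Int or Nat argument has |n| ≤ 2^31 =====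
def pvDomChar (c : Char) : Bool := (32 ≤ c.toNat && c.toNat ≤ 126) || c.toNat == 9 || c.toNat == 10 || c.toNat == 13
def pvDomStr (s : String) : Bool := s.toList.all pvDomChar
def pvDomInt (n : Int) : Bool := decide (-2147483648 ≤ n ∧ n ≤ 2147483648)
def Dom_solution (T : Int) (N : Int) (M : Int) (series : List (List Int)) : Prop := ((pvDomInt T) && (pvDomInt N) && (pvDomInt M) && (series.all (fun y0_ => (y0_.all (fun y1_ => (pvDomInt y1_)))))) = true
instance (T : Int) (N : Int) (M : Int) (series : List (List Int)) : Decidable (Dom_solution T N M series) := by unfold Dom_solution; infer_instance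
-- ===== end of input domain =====

-- B replaces A's hash-counter matching with sort + a two-pointer block sweep over the flat lists of subarray sums (alternative algorithm, same results).

-- ===== PORT A =====
-- inner double loop of A filling one counter dict: for s in range(l): subsum = 0; for e in range(s, l): subsum += ser[e]; counter[subsum] = counter.get(subsum, 0) + 1
def pvFillA (counter0 : PySem.Dict Int Int) (ser : List Int) (l : Int) : PySem.Dict Int Int :=
  (PySem.List.pyRange 0 l 1).foldl
    (fun counter s =>
      ((PySem.List.pyRange s l 1).foldl
          (fun (st : Int × PySem.Dict Int Int) e =>
            let subsum := st.1 + (PySem.List.pyGet? ser e).getD 0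
            (subsum, st.2.insert subsum (st.2.getD subsum 0 + 1)))
          (0, counter)).2)
    counter0

def solution (T : Int) (N : Int) (M : Int) (series : List (List Int)) : Int :=
  -- zip((acounter, bcounter), series, (N, M)) runs min(2, len(series)) iterations
  let ab : PySem.Dict Int Int × PySem.Dict Int Int :=
    match series with
    | [] => (PySem.Dict.empty, PySem.Dict.empty)
    | [ser0] => (pvFillA PySem.Dict.empty ser0 N, PySem.Dict.empty)
    | ser0 :: ser1 :: _ => (pvFillA PySem.Dict.empty ser0 N, pvFillA PySem.Dict.empty ser1 M)
  ab.1.items.foldl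
    (fun count p =>
      let t := T - p.1
      if ab.2.contains t then count + ab.2.getD t 0 * p.2 else count)
    0

-- ===== PORT B =====
-- B's flat generation loop: for s in range(l): acc = 0; for e in range(s, l): acc += ser[e]; out.append(acc)
def pvGenB (ser : List Int) (l : Int) : List Int :=
  (PySem.List.pyRange 0 l 1).foldl
    (fun out s =>
      ((PySem.List.pyRange s l 1).foldl
          (fun (st : List Int × Int) e =>
            let acc := st.2 + (PySem.List.pyGet? ser e).getD 0
            (st.1 ++ [acc], acc))
          (out, 0)).1)
    []

-- B's two-pointer while loop over xs (ascending) and ys (descending); the index pointers i, j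
-- become the suffixes of xs, ys, the run-scanning inner whiles become takeWhile/dropWhile.
def pvSweep (T : Int) : List Int → List Int → Int
  | [], _ => 0
  | _ :: _, [] => 0
  | x :: xs, y :: ys =>
    if x + y < T then pvSweep T xs (y :: ys)
    else if T < x + y then pvSweep T (x :: xs) ys
    else
      let ca := ((x :: xs).takeWhile (fun v => v == x)).length
      let cb := ((y :: ys).takeWhile (fun v => v == y)).length
      (ca : Int) * (cb : Int) +
        pvSweep T ((x :: xs).dropWhile (fun v => v == x)) ((y :: ys).dropWhile (fun v => v == y))
termination_by xs ys => xs.length + ys.length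
decreasing_by
  all_goals
    (have hx : ((x :: xs).dropWhile (fun v => v == x)).length ≤ xs.length := by
       simp; exact List.length_dropWhile_le _ _
     have hy : ((y :: ys).dropWhile (fun v => v == y)).length ≤ ys.length := by
       simp; exact List.length_dropWhile_le _ _
     simp only [List.length_cons]; omega)

def solution_alt (T : Int) (N : Int) (M : Int) (series : List (List Int)) : Int :=
  let sums : List Int × List Int :=
    match series with
    | [] => ([], [])
    | [ser0] => (pvGenB ser0 N, [])
    | ser0 :: ser1 :: _ => (pvGenB ser0 N, pvGenB ser1 M)
  pvSweep T (PySem.List.sorted sums.1 (fun v => v) false) (PySem.List.sorted sums.2 (fun v => v) true)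

-- ===== PRECONDITION & SPEC =====
-- Pre_ excludes exactly the inputs on which Python A raises IndexError: an iterated length
-- (N for series[0], M for series[1]) that is positive yet exceeds the list's length.
def Pre_solution (T : Int) (N : Int) (M : Int) (series : List (List Int)) : Prop :=
  (∀ s0 ∈ series.take 1, N ≤ s0.length ∨ N ≤ 0) ∧
  (∀ s1 ∈ (series.drop 1).take 1, M ≤ s1.length ∨ M ≤ 0)
instance (T : Int) (N : Int) (M : Int) (series : List (List Int)) : Decidable (Pre_solution T N M series) := by unfold Pre_solution; infer_instance

def pvWitness_solution : Int × Int × Int × List (List Int) := (5, 2, 2, [[1, 2], [3, 4]])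

def Spec_solution (T : Int) (N : Int) (M : Int) (series : List (List Int)) (out : Int) : Prop := out = solution_alt T N M series
instance (T : Int) (N : Int) (M : Int) (series : List (List Int)) (out : Int) : Decidable (Spec_solution T N M series out) := by unfold Spec_solution; infer_instance

-- ===== CLAIM (what is proved, stated in full; the proofs are below) =====
def Claim_equal_solution : Prop := ∀ (T : Int) (N : Int) (M : Int) (series : List (List Int)), Dom_solution T N M series → Pre_solution T N M series → Spec_solution T N M series (solution T N M series)

-- ===== LEMMAS AND PROOFS =====

-- the list of subsums emitted by one inner loop, starting from accumulator a0
def pvEmit (ser : List Int) : List Int → Int → List Int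
  | [], _ => []
  | e :: r, a0 => (a0 + (PySem.List.pyGet? ser e).getD 0) :: pvEmit ser r (a0 + (PySem.List.pyGet? ser e).getD 0)

-- the flat list of all contiguous-subarray sums read off by the double loop
def pvFlat (ser : List Int) (l : Int) : List Int :=
  (PySem.List.pyRange 0 l 1).flatMap (fun s => pvEmit ser (PySem.List.pyRange s l 1) 0)

-- the common mathematical value: Σ_{x ∈ xs} (number of occurrences of T - x in ys)
def pvCP (T : Int) (xs ys : List Int) : Int := (xs.map (fun x => (ys.count (T - x) : Int))).sum

lemma pvFillA_inner (ser : List Int) (r : List Int) (a0 : Int) (c : PySem.Dict Int Int) :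
    (r.foldl (fun (st : Int × PySem.Dict Int Int) e =>
        let subsum := st.1 + (PySem.List.pyGet? ser e).getD 0
        (subsum, st.2.insert subsum (st.2.getD subsum 0 + 1))) (a0, c)).2
    = (pvEmit ser r a0).foldl (fun d v => d.insert v (d.getD v 0 + 1)) c := by
  induction r generalizing a0 c with
  | nil => rfl
  | cons e r ih => simp only [List.foldl_cons, pvEmit]; exact ih _ _

lemma pvFoldl_flatMap_dict (g : Int → List Int) (rs : List Int) (c : PySem.Dict Int Int) :
    rs.foldl (fun d s => (g s).foldl (fun d v => d.insert v (d.getD v 0 + 1)) d) c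
      = (rs.flatMap g).foldl (fun d v => d.insert v (d.getD v 0 + 1)) c := by
  induction rs generalizing c with
  | nil => rfl
  | cons s rs ih => simp only [List.foldl_cons, List.flatMap_cons, List.foldl_append]; exact ih _

lemma pvFillA_eq_counter (ser : List Int) (l : Int) :
    pvFillA PySem.Dict.empty ser l = PySem.Dict.counter (pvFlat ser l) := by
  unfold pvFillA pvFlat
  have hstep : (fun (counter : PySem.Dict Int Int) (s : Int) =>
      ((PySem.List.pyRange s l 1).foldl
          (fun (st : Int × PySem.Dict Int Int) e =>
            let subsum := st.1 + (PySem.List.pyGet? ser e).getD 0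
            (subsum, st.2.insert subsum (st.2.getD subsum 0 + 1)))
          (0, counter)).2)
      = (fun (counter : PySem.Dict Int Int) (s : Int) =>
          (pvEmit ser (PySem.List.pyRange s l 1) 0).foldl (fun d v => d.insert v (d.getD v 0 + 1)) counter) := by
    funext counter s
    exact pvFillA_inner ser _ 0 counter
  rw [hstep, pvFoldl_flatMap_dict]
  exact PySem.Dict.foldl_insert_getD_add_one_eq_counter _

lemma pvGenB_inner (ser : List Int) (r : List Int) (a0 : Int) (out : List Int) :
    (r.foldl (fun (st : List Int × Int) e =>
        let acc := st.2 + (PySem.List.pyGet? ser e).getD 0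
        (st.1 ++ [acc], acc)) (out, a0)).1
    = out ++ pvEmit ser r a0 := by
  induction r generalizing a0 out with
  | nil => simp [pvEmit]
  | cons e r ih => simp only [List.foldl_cons, pvEmit]; rw [ih]; simp

lemma pvFoldl_flatMap_append (g : Int → List Int) (rs : List Int) (out : List Int) :
    rs.foldl (fun out s => out ++ g s) out = out ++ rs.flatMap g := by
  induction rs generalizing out with
  | nil => simp
  | cons s rs ih => simp only [List.foldl_cons, List.flatMap_cons]; rw [ih]; simp

lemma pvGenB_eq_flat (ser : List Int) (l : Int) : pvGenB ser l = pvFlat ser l := by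
  unfold pvGenB pvFlat
  have hstep : (fun (out : List Int) (s : Int) =>
      ((PySem.List.pyRange s l 1).foldl
          (fun (st : List Int × Int) e =>
            let acc := st.2 + (PySem.List.pyGet? ser e).getD 0
            (st.1 ++ [acc], acc))
          (out, 0)).1)
      = (fun (out : List Int) (s : Int) => out ++ pvEmit ser (PySem.List.pyRange s l 1) 0) := by
    funext out s
    exact pvGenB_inner ser _ 0 out
  rw [hstep, pvFoldl_flatMap_append]
  simp

lemma pvSum_filter_split (f : Int → Int) (p : Int → Bool) (L : List Int) :
    (L.map f).sum = ((L.filter p).map f).sum + ((L.filter (fun v => !(p v))).map f).sum := by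
  induction L with
  | nil => simp
  | cons x L ih =>
    by_cases hp : p x
    · simp [hp, ih]; ring
    · simp [hp, ih]; ring

-- Σ over the distinct keys, weighted by multiplicity, equals Σ over the list
lemma pvSum_dedup (f : Int → Int) (S L : List Int) (hnd : S.Nodup) (hmem : ∀ x, x ∈ S ↔ x ∈ L) :
    (S.map (fun k => f k * (L.count k : Int))).sum = (L.map f).sum := by
  induction S generalizing L with
  | nil =>
    cases L with
    | nil => rfl
    | cons x L => exact absurd ((hmem x).2 List.mem_cons_self) (List.not_mem_nil)
  | cons k S' ih =>
    have hk : k ∉ S' := (List.nodup_cons.mp hnd).1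
    have hnd' : S'.Nodup := (List.nodup_cons.mp hnd).2
    have hsplit := pvSum_filter_split f (fun v => v == k) L
    have hrepl : ((L.filter (fun v => v == k)).map f).sum = f k * (L.count k : Int) := by
      rw [List.filter_beq k, List.map_replicate, List.sum_replicate, nsmul_eq_mul]
      ring
    have hmem' : ∀ x, x ∈ S' ↔ x ∈ L.filter (fun v => !(v == k)) := by
      intro x
      constructor
      · intro hx
        have hxk : x ≠ k := fun h => hk (h ▸ hx)
        have : x ∈ L := (hmem x).1 (List.mem_cons_of_mem _ hx)
        simp [List.mem_filter, this, hxk]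
      · intro hx
        rcases List.mem_filter.mp hx with ⟨hxL, hne⟩
        have hxk : x ≠ k := by simpa using hne
        rcases List.mem_cons.mp ((hmem x).2 hxL) with h | h
        · exact absurd h hxk
        · exact h
    have hcnt : ∀ x ∈ S', (L.filter (fun v => !(v == k))).count x = L.count x := by
      intro x hx
      have hxk : x ≠ k := fun h => hk (h ▸ hx)
      exact List.count_filter (by simp [hxk])
    calc ((k :: S').map (fun k' => f k' * (L.count k' : Int))).sum
        = f k * (L.count k : Int) + (S'.map (fun k' => f k' * (L.count k' : Int))).sum := by
          simp
      _ = f k * (L.count k : Int)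
            + (S'.map (fun k' => f k' * ((L.filter (fun v => !(v == k))).count k' : Int))).sum := by
          have hmapeq : S'.map (fun k' => f k' * ((L.count k' : Int)))
              = S'.map (fun k' => f k' * ((L.filter (fun v => !(v == k))).count k' : Int)) :=
            List.map_congr_left (fun a ha => by rw [hcnt a ha])
          rw [hmapeq]
      _ = f k * (L.count k : Int) + ((L.filter (fun v => !(v == k))).map f).sum := by
          rw [ih _ hnd' hmem']
      _ = (L.map f).sum := by rw [hsplit, hrepl]

lemma pvCountLoop_eq (T : Int) (LA LB : List Int) :
    (PySem.Dict.counter LA).items.foldl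
      (fun count (p : Int × Int) =>
        let t := T - p.1
        if (PySem.Dict.counter LB).contains t then count + (PySem.Dict.counter LB).getD t 0 * p.2 else count)
      0 = pvCP T LA LB := by
  rw [PySem.Dict.items_counter, List.foldl_map]
  have hstep : (fun (count : Int) (k : Int) =>
      (fun (count : Int) (p : Int × Int) =>
        let t := T - p.1
        if (PySem.Dict.counter LB).contains t then count + (PySem.Dict.counter LB).getD t 0 * p.2 else count)
        count (k, (LA.count k : Int)))
      = (fun (count : Int) (k : Int) => count + (LB.count (T - k) : Int) * (LA.count k : Int)) := by
    funext count k
    simp only [PySem.Dict.contains_counter, PySem.Dict.getD_counter]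
    by_cases hmem : (T - k) ∈ LB
    · simp [hmem]
    · simp [hmem, List.count_eq_zero_of_not_mem hmem]
  rw [hstep, PySem.List.foldl_add]
  rw [pvSum_dedup (fun k => (LB.count (T - k) : Int)) (PySem.Set.ofList LA) LA
        (PySem.Set.nodup_ofList LA) (fun x => PySem.Set.mem_ofList LA x)]
  simp [pvCP]

lemma pvHead_dropWhile (p : Int → Bool) :
    ∀ (l : List Int) (d : Int) (rest : List Int), l.dropWhile p = d :: rest → p d = false := by
  intro l
  induction l with
  | nil => intro d rest h; simp at h
  | cons a l ih =>
    intro d rest h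
    by_cases hpa : p a
    · rw [List.dropWhile_cons_of_pos hpa] at h; exact ih d rest h
    · rw [List.dropWhile_cons_of_neg hpa] at h
      cases h
      simpa using hpa

lemma pvSweep_eq_pvCP (T : Int) (xs ys : List Int)
    (hx : xs.Pairwise (· ≤ ·)) (hy : ys.Pairwise (fun a b => b ≤ a)) :
    pvSweep T xs ys = pvCP T xs ys := by
  revert hx hy
  induction xs, ys using pvSweep.induct T with
  | case1 ys => intro _ _; simp [pvSweep, pvCP]
  | case2 x xs => intro _ _; simp [pvSweep, pvCP]
  | case3 x xs y ys hlt ih =>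
    intro hx hy
    have hcnt : (y :: ys).count (T - x) = 0 := by
      rw [List.count_eq_zero]
      intro hmem
      rcases List.mem_cons.mp hmem with h | h
      · omega
      · have := List.rel_of_pairwise_cons hy h; omega
    simp only [pvSweep, if_pos hlt]
    rw [ih (hx.of_cons) hy]
    simp [pvCP, hcnt]
  | case4 x xs y ys hlt hgt ih =>
    intro hx hy
    have hcnt : ∀ v ∈ x :: xs, ((y :: ys).count (T - v) : Int) = (ys.count (T - v) : Int) := by
      intro v hv
      have hxv : x ≤ v := by
        rcases List.mem_cons.mp hv with h | h
        · omega
        · exact List.rel_of_pairwise_cons hx h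
      have hne : (T - v) ≠ y := by omega
      rw [List.count_cons]
      simp only [beq_iff_eq]
      rw [if_neg (fun h => hne h.symm)]
      simp
    simp only [pvSweep, if_neg hlt, if_pos hgt]
    rw [ih hx (hy.of_cons)]
    unfold pvCP
    rw [List.map_congr_left (fun v hv => (hcnt v hv).symm)]
  | case5 x xs y ys hlt hgt ih =>
    intro hx hy
    have hT : y = T - x := by omega
    have htX : ∀ v ∈ (x :: xs).takeWhile (fun v => v == x), v = x := by
      intro v hv; have := List.mem_takeWhile_imp hv; simpa using this
    have htY : ∀ v ∈ (y :: ys).takeWhile (fun v => v == y), v = y := by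
      intro v hv; have := List.mem_takeWhile_imp hv; simpa using this
    have hdX : ∀ v ∈ (x :: xs).dropWhile (fun v => v == x), x < v := by
      intro v hv
      rcases hdw : (x :: xs).dropWhile (fun v => v == x) with _ | ⟨d, rest⟩
      · rw [hdw] at hv; exact absurd hv List.not_mem_nil
      · have hdne : d ≠ x := by
          have := pvHead_dropWhile (fun v => v == x) (x :: xs) d rest hdw
          simpa using this
        have hdmem : d ∈ x :: xs := (List.dropWhile_sublist _).mem (hdw ▸ List.mem_cons_self)
        have hxd : x < d := by
          rcases List.mem_cons.mp hdmem with h | h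
          · exact absurd h hdne
          · exact lt_of_le_of_ne (List.rel_of_pairwise_cons hx h) (Ne.symm hdne)
        rw [hdw] at hv
        rcases List.mem_cons.mp hv with h | h
        · omega
        · have hpw : (d :: rest).Pairwise (fun a b : Int => a ≤ b) :=
            (hdw ▸ (hx.sublist (List.dropWhile_sublist _)))
          have := List.rel_of_pairwise_cons hpw h
          omega
    have hdY : ∀ v ∈ (y :: ys).dropWhile (fun v => v == y), v < y := by
      intro v hv
      rcases hdw : (y :: ys).dropWhile (fun v => v == y) with _ | ⟨d, rest⟩
      · rw [hdw] at hv; exact absurd hv List.not_mem_nil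
      · have hdne : d ≠ y := by
          have := pvHead_dropWhile (fun v => v == y) (y :: ys) d rest hdw
          simpa using this
        have hdmem : d ∈ y :: ys := (List.dropWhile_sublist _).mem (hdw ▸ List.mem_cons_self)
        have hyd : d < y := by
          rcases List.mem_cons.mp hdmem with h | h
          · exact absurd h hdne
          · exact lt_of_le_of_ne (List.rel_of_pairwise_cons hy h) hdne
        rw [hdw] at hv
        rcases List.mem_cons.mp hv with h | h
        · omega
        · have hpw : (d :: rest).Pairwise (fun a b : Int => b ≤ a) :=
            (hdw ▸ (hy.sublist (List.dropWhile_sublist _)))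
          have := List.rel_of_pairwise_cons hpw h
          omega
    have hx' : ((x :: xs).dropWhile (fun v => v == x)).Pairwise (fun a b : Int => a ≤ b) :=
      hx.sublist (List.dropWhile_sublist _)
    have hy' : ((y :: ys).dropWhile (fun v => v == y)).Pairwise (fun a b : Int => b ≤ a) :=
      hy.sublist (List.dropWhile_sublist _)
    have hcY : ((y :: ys).count y : Int) = (((y :: ys).takeWhile (fun v => v == y)).length : Int) := by
      have h1 : ((y :: ys).takeWhile (fun v => v == y)).count y
          = ((y :: ys).takeWhile (fun v => v == y)).length :=
        List.count_eq_length.mpr (fun b hb => (htY b hb).symm)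
      have h2 : ((y :: ys).dropWhile (fun v => v == y)).count y = 0 :=
        List.count_eq_zero.mpr (fun hmem => lt_irrefl y (hdY y hmem))
      conv_lhs => rw [← List.takeWhile_append_dropWhile (p := fun v => v == y) (l := y :: ys)]
      rw [List.count_append, h1, h2]
      simp
    have hsum : pvCP T (x :: xs) (y :: ys)
        = (((x :: xs).takeWhile (fun v => v == x)).length : Int)
            * (((y :: ys).takeWhile (fun v => v == y)).length : Int)
          + pvCP T ((x :: xs).dropWhile (fun v => v == x)) ((y :: ys).dropWhile (fun v => v == y)) := by
      conv_lhs => rw [pvCP, ← List.takeWhile_append_dropWhile (p := fun v => v == x) (l := x :: xs),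
        List.map_append, List.sum_append]
      have hA : (((x :: xs).takeWhile (fun v => v == x)).map
            (fun v => (((y :: ys).count (T - v)) : Int))).sum
          = (((x :: xs).takeWhile (fun v => v == x)).length : Int)
              * (((y :: ys).takeWhile (fun v => v == y)).length : Int) := by
        have hconst : ∀ v ∈ (x :: xs).takeWhile (fun v => v == x),
            (((y :: ys).count (T - v)) : Int)
              = ((((y :: ys).takeWhile (fun v => v == y)).length : Nat) : Int) := by
          intro v hv
          rw [htX v hv, show T - x = y by omega]
          exact hcY
        rw [List.map_congr_left hconst, List.map_const', List.sum_replicate, nsmul_eq_mul]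
      have hB : (((x :: xs).dropWhile (fun v => v == x)).map
            (fun v => (((y :: ys).count (T - v)) : Int))).sum
          = pvCP T ((x :: xs).dropWhile (fun v => v == x)) ((y :: ys).dropWhile (fun v => v == y)) := by
        have hcdrop : ∀ v ∈ (x :: xs).dropWhile (fun v => v == x),
            (((y :: ys).count (T - v)) : Int)
              = ((((y :: ys).dropWhile (fun v => v == y)).count (T - v) : Nat) : Int) := by
          intro v hv
          have hvx : x < v := hdX v hv
          have h0 : ((y :: ys).takeWhile (fun v => v == y)).count (T - v) = 0 := by
            rw [List.count_eq_zero]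
            intro hmem
            have := htY _ hmem
            omega
          conv_lhs => rw [← List.takeWhile_append_dropWhile (p := fun v => v == y) (l := y :: ys)]
          rw [List.count_append, h0]
          simp
        rw [List.map_congr_left hcdrop]
        rfl
      rw [hA, hB]
    simp only [pvSweep, if_neg hlt, if_neg hgt]
    rw [hsum, ih hx' hy']

lemma pvCP_perm (T : Int) {xs xs' ys ys' : List Int} (h1 : xs.Perm xs') (h2 : ys.Perm ys') :
    pvCP T xs ys = pvCP T xs' ys' := by
  unfold pvCP
  have hcnt : ∀ x : Int, ((ys.count (T - x) : Int)) = ((ys'.count (T - x) : Int)) := by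
    intro x; rw [h2.count_eq]
  rw [List.map_congr_left (fun a _ => hcnt a)]
  exact ((h1.map _)).sum_eq

lemma pvAlt_eq (T : Int) (LA LB : List Int) :
    pvSweep T (PySem.List.sorted LA (fun v => v) false) (PySem.List.sorted LB (fun v => v) true)
      = pvCP T LA LB := by
  rw [pvSweep_eq_pvCP T _ _ (PySem.List.sorted_pairwise LA (fun v => v))
        (PySem.List.sorted_pairwise_rev LB (fun v => v))]
  exact pvCP_perm T (PySem.List.sorted_perm LA _ false) (PySem.List.sorted_perm LB _ true)

lemma solution_eq_pvCP (T N M : Int) (series : List (List Int)) :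
    ∃ LA LB : List Int,
      solution T N M series = pvCP T LA LB ∧ solution_alt T N M series = pvCP T LA LB := by
  match series with
  | [] =>
    refine ⟨[], [], ?_, ?_⟩
    · exact pvCountLoop_eq T [] []
    · exact pvAlt_eq T [] []
  | [ser0] =>
    refine ⟨pvFlat ser0 N, [], ?_, ?_⟩
    · have h := pvCountLoop_eq T (pvFlat ser0 N) []
      simp only [solution]
      rw [pvFillA_eq_counter]
      exact h
    · simp only [solution_alt]
      rw [pvGenB_eq_flat]
      exact pvAlt_eq T (pvFlat ser0 N) []
  | ser0 :: ser1 :: rest =>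
    refine ⟨pvFlat ser0 N, pvFlat ser1 M, ?_, ?_⟩
    · have h := pvCountLoop_eq T (pvFlat ser0 N) (pvFlat ser1 M)
      simp only [solution]
      rw [pvFillA_eq_counter, pvFillA_eq_counter]
      exact h
    · simp only [solution_alt]
      rw [pvGenB_eq_flat, pvGenB_eq_flat]
      exact pvAlt_eq T (pvFlat ser0 N) (pvFlat ser1 M)

-- ===== VERDICT (by name: the statement is the Claim_ definition above) =====
theorem solution_spec : Claim_equal_solution := by
  intro T N M series _ _
  obtain ⟨LA, LB, h1, h2⟩ := solution_eq_pvCP T N M series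
  unfold Spec_solution
  rw [h1, h2]
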